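-- pv_equiv track=rewrite | github.com/g-sloup/python-challenge | PyBank/main.py | min_pl
-- ===== SOURCE A (Python) =====
-- def min_pl(sequence):
--     if not sequence:
--         raise ValueError('empty sequence')
--
--     minimum = sequence[0]
--
--     for item in sequence:
--         if item[1] < minimum[1]:
--             minimum = item
--
--     return minimum
-- ===== SOURCE B (Python) =====
-- def min_pl(sequence):
--     if not sequence:
--         raise ValueError('empty sequence')
--     vmin = min(value for _, value in sequence)
--     for item in sequence:
--         if item[1] == vmin:
--             return item
-- ===== Notes on version B (the rewrite author's own statement) =====
-- stated objective: alternative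
-- what changed: Replaces the single running-minimum scan over pairs with two staged passes: first compute the minimum value with min() over the second components, then return the first pair carrying that value.
import Mathlib
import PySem

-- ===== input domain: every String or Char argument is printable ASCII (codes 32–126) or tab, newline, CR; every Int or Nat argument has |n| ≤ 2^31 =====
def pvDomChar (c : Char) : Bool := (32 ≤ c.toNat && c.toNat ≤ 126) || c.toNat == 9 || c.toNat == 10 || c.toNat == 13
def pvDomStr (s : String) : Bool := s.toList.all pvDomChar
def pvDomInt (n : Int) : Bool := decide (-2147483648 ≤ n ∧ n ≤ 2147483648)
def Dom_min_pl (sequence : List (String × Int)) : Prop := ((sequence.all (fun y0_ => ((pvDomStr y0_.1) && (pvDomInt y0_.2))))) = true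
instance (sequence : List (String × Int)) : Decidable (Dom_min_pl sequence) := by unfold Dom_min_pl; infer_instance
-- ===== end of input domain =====

-- B replaces A's single running-minimum scan with two staged passes: min() over the
-- second components, then the first pair carrying that value (objective: alternative).


-- ===== PORT A =====
def min_pl (sequence : List (String × Int)) : String × Int :=
  match sequence with
  | [] => ("", 0)  -- Python raises ValueError('empty sequence') here; excluded by Pre_min_pl
  | m0 :: _ =>
    sequence.foldl (fun minimum item => if item.2 < minimum.2 then item else minimum) m0

-- ===== PORT B =====
def min_pl_alt (sequence : List (String × Int)) : String × Int :=
  match PySem.List.min? (sequence.map (fun item => item.2)) (fun v => v) with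
  | none => ("", 0)  -- only for sequence = [], where Python raises ValueError; excluded by Pre_min_pl
  | some vmin =>
    match sequence.find? (fun item => item.2 == vmin) with
    | some item => item
    | none => ("", 0)  -- unreachable: vmin is the value of some element of sequence

-- ===== PRECONDITION & SPEC =====
-- A (and B) raise ValueError on the empty list; Pre_ excludes exactly that input.
def Pre_min_pl (sequence : List (String × Int)) : Prop := sequence ≠ []
instance (sequence : List (String × Int)) : Decidable (Pre_min_pl sequence) := by unfold Pre_min_pl; infer_instance
def pvWitness_min_pl : (List (String × Int)) := [("a", 3), ("b", 1), ("c", 1)]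
def Spec_min_pl (sequence : List (String × Int)) (out : String × Int) : Prop := out = min_pl_alt sequence
instance (sequence : List (String × Int)) (out : String × Int) : Decidable (Spec_min_pl sequence out) := by unfold Spec_min_pl; infer_instance

-- ===== CLAIM (what is proved, stated in full; the proofs are below) =====
def Claim_equal_min_pl : Prop := ∀ (sequence : List (String × Int)), Dom_min_pl sequence → Pre_min_pl sequence → Spec_min_pl sequence (min_pl sequence)

-- ===== LEMMAS AND PROOFS =====

-- A's running-minimum step
def pvStep (minimum item : String × Int) : String × Int :=
  if item.2 < minimum.2 then item else minimum

-- the accumulator only ever moves to a strictly smaller value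
lemma fold_eq_or_lt (t : List (String × Int)) :
    ∀ m : String × Int, t.foldl pvStep m = m ∨ (t.foldl pvStep m).2 < m.2 := by
  induction t with
  | nil => intro m; exact Or.inl rfl
  | cons x t ih =>
    intro m
    simp only [List.foldl_cons, pvStep]
    by_cases h : x.2 < m.2 <;> simp only [h, if_true, if_false]
    · rcases ih x with h' | h'
      · exact Or.inr (by rw [h']; exact h)
      · exact Or.inr (h'.trans h)
    · exact ih m

-- the value of A's running minimum is min() of the second components
lemma fold_snd_eq_min (t : List (String × Int)) :
    ∀ m : String × Int,
      (t.map (fun item => item.2)).foldl min m.2 = (t.foldl pvStep m).2 := by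
  induction t with
  | nil => intro m; rfl
  | cons x t ih =>
    intro m
    simp only [List.map_cons, List.foldl_cons, pvStep]
    by_cases h : x.2 < m.2
    · rw [min_eq_right (le_of_lt h)]
      simp only [h, if_true]
      exact ih x
    · rw [min_eq_left (by omega)]
      simp only [h, if_false]
      exact ih m

-- A's running minimum is the FIRST element carrying the minimal value
lemma find?_fold (t : List (String × Int)) :
    ∀ m : String × Int,
      (m :: t).find? (fun x => x.2 == (t.foldl pvStep m).2) = some (t.foldl pvStep m) := by
  induction t with
  | nil => intro m; simp [List.find?]
  | cons x t ih =>
    intro m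
    simp only [List.foldl_cons, pvStep]
    by_cases h : x.2 < m.2 <;> simp only [h, if_true, if_false]
    · -- accumulator becomes x; m cannot carry the (strictly smaller) final value
      have hle : (t.foldl pvStep x).2 ≤ x.2 := by
        rcases fold_eq_or_lt t x with h' | h'
        · rw [h']
        · exact le_of_lt h'
      have hm : ¬ (m.2 == (t.foldl pvStep x).2) = true := by
        simp only [beq_iff_eq]; omega
      rw [List.find?]
      simp only [hm, if_false] at *
      simpa [hm] using ih x
    · -- accumulator stays the fold over t with m
      rcases fold_eq_or_lt t m with h' | h'
      · -- final value is m itself: found at the head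
        rw [h']; simp [List.find?]
      · -- final value strictly below m.2 ≤ x.2: skip m and x, reuse ih on (m :: t)
        have hm : ¬ (m.2 == (t.foldl pvStep m).2) = true := by
          simp only [beq_iff_eq]; omega
        have hx : ¬ (x.2 == (t.foldl pvStep m).2) = true := by
          simp only [beq_iff_eq]; omega
        have := ih m
        rw [List.find?] at this
        simp only [hm, if_false] at this
        rw [List.find?]; simp only [hm, if_false]
        rw [List.find?]; simp only [hx]
        exact this

theorem min_pl_eq (h : String × Int) (t : List (String × Int)) :
    min_pl (h :: t) = min_pl_alt (h :: t) := by
  have ha : min_pl (h :: t) = t.foldl pvStep h := by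
    simp only [min_pl, List.foldl_cons, ite_self]
    rfl
  have hmin : PySem.List.min? ((h :: t).map (fun item => item.2)) (fun v => v)
      = some ((t.foldl pvStep h).2) := by
    rw [List.map_cons, PySem.List.min?_id_cons, fold_snd_eq_min]
  have hfind : (h :: t).find? (fun x => x.2 == (t.foldl pvStep h).2)
      = some (t.foldl pvStep h) := find?_fold t h
  unfold min_pl_alt
  rw [hmin]
  dsimp only
  rw [hfind, ha]

-- ===== VERDICT (by name: the statement is the Claim_ definition above) =====
theorem min_pl_spec : Claim_equal_min_pl := by
  intro sequence _ hpre
  unfold Spec_min_pl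
  cases sequence with
  | nil => exact absurd rfl hpre
  | cons h t => exact min_pl_eq h t
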